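-- pv_equiv track=rewrite | github.com/skrillcii/leetcode | easy/0977_SquaresOfASortedArrays.py | sortedSquares_1st_trial
-- ===== SOURCE A (Python) =====
-- def sortedSquares_1st_trial(A: list) -> list:
--     '''
--     Time Complexity = (NlogN)
--     Space Complexity = (N)
--     '''
--     list_ = []
--
--     if A == []:
--         return list_
--
--     for i in A:
--         list_.append(i * i)
--     list_.sort()
--     return list_
-- ===== SOURCE B (Python) =====
-- def sortedSquares_1st_trial(A: list) -> list:
--     # Sort the values themselves (not the squares), then a two-pointer merge
--     # from both ends: the largest remaining square is always at one of the two
--     # ends of the sorted values, so emit squares largest-first and reverse once.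
--     # The output is produced by the merge, never by sorting squares.
--     S = sorted(A)
--     out = []
--     lo, hi = 0, len(S) - 1
--     while lo <= hi:
--         if abs(S[lo]) > abs(S[hi]):
--             out.append(S[lo] * S[lo])
--             lo += 1
--         else:
--             out.append(S[hi] * S[hi])
--             hi -= 1
--     out.reverse()
--     return out
-- ===== Notes on version B (the rewrite author's own statement) =====
-- stated objective: alternative
-- what changed: A squares every element and comparison-sorts the squares; B sorts the values once and then produces the squares by a linear two-pointer merge from both ends of the sorted values (largest square is always at an end), so the output list is built by a merge, not by sorting squares.
import Mathlib
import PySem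

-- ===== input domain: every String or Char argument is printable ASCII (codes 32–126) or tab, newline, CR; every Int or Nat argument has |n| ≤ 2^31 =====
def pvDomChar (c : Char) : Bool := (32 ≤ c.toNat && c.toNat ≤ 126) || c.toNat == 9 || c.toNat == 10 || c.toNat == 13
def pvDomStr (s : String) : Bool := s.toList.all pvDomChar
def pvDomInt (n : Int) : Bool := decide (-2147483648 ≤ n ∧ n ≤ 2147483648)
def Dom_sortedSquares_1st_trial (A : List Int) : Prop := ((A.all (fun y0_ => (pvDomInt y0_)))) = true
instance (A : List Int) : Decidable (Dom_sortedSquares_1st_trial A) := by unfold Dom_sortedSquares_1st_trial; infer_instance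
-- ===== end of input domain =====

-- B sorts the values once and then builds the squares by a linear two-pointer merge
-- from both ends of the sorted values; A instead squares everything and sorts the squares.


-- ===== PORT A =====
def sortedSquares_1st_trial (A : List Int) : List Int :=
  let list_ : List Int := []
  if A == [] then list_
  else
    let list_ := A.foldl (fun acc i => acc ++ [i * i]) list_
    PySem.List.sorted list_ (fun x => x) false

-- ===== PORT B =====
-- the while loop over the window S[lo..hi]: take the end with the larger
-- absolute value, emitting squares largest-first (here: front of the window
-- = head, back of the window = last element)
def pvTwoPtr : List Int → List Int
  | [] => []
  | x :: rest =>
    match h : rest.getLast? with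
    | none => [x * x]
    | some y =>
      if |y| < |x| then x * x :: pvTwoPtr rest
      else y * y :: pvTwoPtr (x :: rest.dropLast)
termination_by xs => xs.length
decreasing_by
  · simp only [List.length_cons]; omega
  · cases rest with
    | nil => simp at h
    | cons a t => simp only [List.length_cons, List.length_dropLast]; omega

-- S = sorted(A); run the merge on S; out.reverse(); return out
def sortedSquares_1st_trial_alt (A : List Int) : List Int :=
  (pvTwoPtr (PySem.List.sorted A (fun x => x) false)).reverse

-- ===== PRECONDITION & SPEC =====
def Spec_sortedSquares_1st_trial (A : List Int) (out : List Int) : Prop := out = sortedSquares_1st_trial_alt A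
instance (A : List Int) (out : List Int) : Decidable (Spec_sortedSquares_1st_trial A out) := by unfold Spec_sortedSquares_1st_trial; infer_instance

-- ===== CLAIM (what is proved, stated in full; the proofs are below) =====
def Claim_equal_sortedSquares_1st_trial : Prop := ∀ (A : List Int), Dom_sortedSquares_1st_trial A → Spec_sortedSquares_1st_trial A (sortedSquares_1st_trial A)

-- ===== LEMMAS AND PROOFS =====

-- squares compare like absolute values
lemma pv_sq_le_sq {a b : Int} (h : |a| ≤ |b|) : a * a ≤ b * b := by
  have h2 := mul_self_le_mul_self (abs_nonneg a) h
  rwa [abs_mul_abs_self, abs_mul_abs_self] at h2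

-- a value between x and y has its square below one of the two end squares
lemma pv_between_sq {x w y : Int} (h1 : x ≤ w) (h2 : w ≤ y) :
    w * w ≤ x * x ∨ w * w ≤ y * y := by
  by_cases hw : 0 ≤ w
  · exact Or.inr (mul_self_le_mul_self hw h2)
  · left
    have := mul_self_le_mul_self (a := -w) (b := -x) (by omega) (by omega)
    simpa using this

lemma pv_getLast?_split {rest : List Int} {y : Int} (h : rest.getLast? = some y) :
    rest = rest.dropLast ++ [y] := by
  have hne : rest ≠ [] := by intro hnil; rw [hnil] at h; simp at h
  have := List.dropLast_append_getLast hne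
  rw [List.getLast_eq_iff_getLast?_eq_some hne |>.mpr h] at this
  exact this.symm

-- pvTwoPtr produces exactly the squares of the input, as a multiset
lemma pv_twoPtr_perm (xs : List Int) :
    (pvTwoPtr xs).Perm (xs.map (fun x => x * x)) := by
  fun_induction pvTwoPtr xs with
  | case1 => simp
  | case2 x rest h =>
    have : rest = [] := by
      cases rest with
      | nil => rfl
      | cons a t => simp at h
    simp [this]
  | case3 x rest y h hle ih =>
    simpa using ih.cons (x * x)
  | case4 x rest y h hle ih =>
    have hsplit := pv_getLast?_split h
    have h2 : (x :: rest).map (fun x => x * x)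
        = x * x :: (rest.dropLast.map (fun x => x * x) ++ [y * y]) := by
      rw [hsplit]; simp
    rw [h2]
    refine (ih.cons (y * y)).trans ?_
    simp only [List.map_cons]
    exact (List.Perm.swap _ _ _).trans (((List.perm_append_singleton _ _).symm).cons _)

-- membership: every output of pvTwoPtr is the square of a member
lemma pv_twoPtr_mem {xs : List Int} {z : Int} (hz : z ∈ pvTwoPtr xs) :
    ∃ w ∈ xs, z = w * w := by
  have := (pv_twoPtr_perm xs).mem_iff.mp hz
  simp only [List.mem_map] at this
  obtain ⟨w, hw, he⟩ := this
  exact ⟨w, hw, he.symm⟩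

-- in a sorted list, everything is below the last element
lemma pv_le_getLast {l : List Int} {y : Int} (hs : l.Pairwise (· ≤ ·))
    (h : l.getLast? = some y) : ∀ w ∈ l, w ≤ y := by
  have hne : l ≠ [] := by intro hnil; rw [hnil] at h; simp at h
  have hsplit : l = l.dropLast ++ [y] := by
    have := List.dropLast_append_getLast hne
    rw [List.getLast_eq_iff_getLast?_eq_some hne |>.mpr h] at this
    exact this.symm
  rw [hsplit] at hs ⊢
  rw [List.pairwise_append] at hs
  intro w hw
  rcases List.mem_append.mp hw with hw | hw
  · exact hs.2.2 w hw y (by simp)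
  · simp at hw; omega

-- on a sorted window, pvTwoPtr emits squares in non-increasing order
lemma pv_twoPtr_pairwise (xs : List Int) (hs : xs.Pairwise (· ≤ ·)) :
    (pvTwoPtr xs).Pairwise (fun a b => b ≤ a) := by
  fun_induction pvTwoPtr xs with
  | case1 => simp
  | case2 x rest h => simp
  | case3 x rest y h hlt ih =>
    have hrest : rest.Pairwise (· ≤ ·) := hs.tail
    refine List.pairwise_cons.mpr ⟨?_, ih hrest⟩
    intro z hz
    obtain ⟨w, hw, he⟩ := pv_twoPtr_mem hz
    have hxw : x ≤ w := (List.pairwise_cons.mp hs).1 w hw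
    have hwy : w ≤ y := pv_le_getLast hrest h w hw
    have hyx : y * y ≤ x * x := pv_sq_le_sq (le_of_lt hlt)
    rcases pv_between_sq hxw hwy with hc | hc
    · omega
    · omega
  | case4 x rest y h hlt ih =>
    have hsub : (x :: rest.dropLast).Sublist (x :: rest) :=
      (List.dropLast_sublist rest).cons₂ x
    have hsort' : (x :: rest.dropLast).Pairwise (· ≤ ·) := hs.sublist hsub
    refine List.pairwise_cons.mpr ⟨?_, ih hsort'⟩
    intro z hz
    obtain ⟨w, hw, he⟩ := pv_twoPtr_mem hz
    have hw' : w ∈ x :: rest := hsub.mem hw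
    have hxw : x ≤ w := by
      rcases List.mem_cons.mp hw' with hw2 | hw2
      · omega
      · exact (List.pairwise_cons.mp hs).1 w hw2
    have hwy : w ≤ y := by
      rcases List.mem_cons.mp hw' with hw2 | hw2
      · subst hw2
        have hy_mem : y ∈ rest := by
          rw [pv_getLast?_split h]; simp
        exact (List.pairwise_cons.mp hs).1 y hy_mem
      · exact pv_le_getLast hs.tail h w hw2
    have hxy : x * x ≤ y * y := pv_sq_le_sq (by omega)
    rcases pv_between_sq hxw hwy with hc | hc
    · omega
    · omega

-- ===== VERDICT (by name: the statement is the Claim_ definition above) =====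
theorem sortedSquares_1st_trial_spec : Claim_equal_sortedSquares_1st_trial := by
  intro A _
  unfold Spec_sortedSquares_1st_trial
  by_cases hA0 : A = []
  · subst hA0
    have h0 : PySem.List.sorted ([] : List Int) (fun x => x) false = [] := rfl
    simp [sortedSquares_1st_trial, sortedSquares_1st_trial_alt, h0, pvTwoPtr]
  · unfold sortedSquares_1st_trial
    have hne : (A == []) = false := by simpa using hA0
    simp only [hne, Bool.false_eq_true, if_false]
    rw [PySem.List.foldl_append_singleton_eq_map]
    have hSperm : (PySem.List.sorted A (fun x => x) false).Perm A :=
      PySem.List.sorted_perm A (fun x => x) false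
    have hSsort : (PySem.List.sorted A (fun x => x) false).Pairwise (· ≤ ·) :=
      PySem.List.sorted_pairwise A (fun x => x)
    have hperm : (sortedSquares_1st_trial_alt A).Perm (A.map (fun x => x * x)) := by
      unfold sortedSquares_1st_trial_alt
      exact ((List.reverse_perm _).trans (pv_twoPtr_perm _)).trans (hSperm.map _)
    have hpair : (sortedSquares_1st_trial_alt A).Pairwise (· ≤ ·) := by
      unfold sortedSquares_1st_trial_alt
      exact List.pairwise_reverse.mpr (pv_twoPtr_pairwise _ hSsort)
    simpa using PySem.List.sorted_id_eq_of_perm_of_pairwise _ _ hperm hpair
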